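-- pv_equiv track=rewrite | github.com/SiddhuPiddhu/Ticket-Bot | bot/database/base.py | _qmark_to_dollar
-- ===== SOURCE A (Python) =====
-- def _qmark_to_dollar(query: str) -> str:
--     idx = 1
--     out: list[str] = []
--     for char in query:
--         if char == "?":
--             out.append(f"${idx}")
--             idx += 1
--         else:
--             out.append(char)
--     return "".join(out)
-- ===== SOURCE B (Python) =====
-- def _qmark_to_dollar(query: str) -> str:
--     parts = query.split("?")
--     out = parts[0]
--     for i, part in enumerate(parts[1:], start=1):
--         out += f"${i}" + part
--     return out
-- ===== Notes on version B (the rewrite author's own statement) =====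
-- stated objective: faster
-- what changed: Replaces the per-character branch-and-append loop building a list of one-character strings with a single split on the placeholder character followed by stitching the segments together with numbered markers.
import Mathlib
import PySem

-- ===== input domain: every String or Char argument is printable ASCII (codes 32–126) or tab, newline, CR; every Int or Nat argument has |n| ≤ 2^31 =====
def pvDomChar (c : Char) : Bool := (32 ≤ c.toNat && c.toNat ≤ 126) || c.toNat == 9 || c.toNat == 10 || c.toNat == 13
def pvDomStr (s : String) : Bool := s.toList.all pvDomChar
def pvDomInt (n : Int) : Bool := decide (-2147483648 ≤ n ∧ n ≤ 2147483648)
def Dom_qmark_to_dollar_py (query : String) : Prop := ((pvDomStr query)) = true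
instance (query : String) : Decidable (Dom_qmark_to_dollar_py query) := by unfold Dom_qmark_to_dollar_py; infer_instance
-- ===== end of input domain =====

-- B replaces A's per-character branch-on-the-placeholder loop by one split into segments then stitching with numbered markers (same O(n), measurably faster constant factor).


-- ===== PORT A =====
-- idx starts at 1; each '?' becomes "$idx" (old idx) and idx increments; "".join at the end
def qmark_to_dollar_py (query : String) : String :=
  let st := query.toList.foldl
    (fun (st : Int × List String) ch =>
      if ch == '?' then (st.1 + 1, st.2 ++ ["$" ++ PySem.Int.toStr st.1])
      else (st.1, st.2 ++ [String.ofList [ch]]))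
    ((1 : Int), ([] : List String))
  PySem.Str.join "" st.2

-- ===== PORT B =====
-- parts = query.split("?"); out = parts[0]; for i, part in enumerate(parts[1:], 1): out += f"${i}" + part
def qmark_to_dollar_py_alt (query : String) : String :=
  match PySem.Str.split? query "?" with
  | none => ""          -- unreachable: the separator "?" is nonempty
  | some [] => ""       -- unreachable: str.split never returns an empty list
  | some (p0 :: rest) =>
    (rest.foldl
      (fun (st : Int × String) part =>
        (st.1 + 1, st.2 ++ ("$" ++ PySem.Int.toStr st.1) ++ part))
      ((1 : Int), p0)).2

-- ===== PRECONDITION & SPEC =====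
def Spec_qmark_to_dollar_py (query : String) (out : String) : Prop := out = qmark_to_dollar_py_alt query
instance (query : String) (out : String) : Decidable (Spec_qmark_to_dollar_py query out) := by unfold Spec_qmark_to_dollar_py; infer_instance

-- ===== CLAIM (what is proved, stated in full; the proofs are below) =====
def Claim_equal_qmark_to_dollar_py : Prop := ∀ (query : String), Dom_qmark_to_dollar_py query → Spec_qmark_to_dollar_py query (qmark_to_dollar_py query)

-- ===== LEMMAS AND PROOFS =====

-- characters produced by A's loop starting at counter idx
def pvA (idx : Int) : List Char → List Char
  | [] => []
  | c :: t =>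
    if c = '?' then '$' :: (PySem.Int.toStr idx).toList ++ pvA (idx + 1) t
    else c :: pvA idx t

-- characters produced by B's stitching loop over the remaining segments
def pvStitch (i : Int) : List (List Char) → List Char
  | [] => []
  | p :: ps => '$' :: (PySem.Int.toStr i).toList ++ p ++ pvStitch (i + 1) ps

theorem pv_join_nil (out : List String) :
    (PySem.Str.join "" out).toList = (out.map String.toList).flatten := by
  rw [PySem.Str.toList_join]
  show List.intercalate [] _ = _
  induction out.map String.toList with
  | nil => rfl
  | cons p ps ih =>
    cases ps with
    | nil => simp [List.intercalate]
    | cons q qs =>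
      simp only [List.intercalate] at ih ⊢
      simp [List.intersperse, ih]

theorem pv_foldA (cs : List Char) : ∀ (idx : Int) (out : List String),
    ((cs.foldl
      (fun (st : Int × List String) ch =>
        if ch == '?' then (st.1 + 1, st.2 ++ ["$" ++ PySem.Int.toStr st.1])
        else (st.1, st.2 ++ [String.ofList [ch]]))
      (idx, out)).2.map String.toList).flatten
      = (out.map String.toList).flatten ++ pvA idx cs := by
  induction cs with
  | nil => intro idx out; simp [pvA]
  | cons c t ih =>
    intro idx out
    by_cases h : c = '?'
    · subst h
      simp only [List.foldl_cons, beq_self_eq_true, ih, pvA]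
      simp [String.toList_append]
    · have hb : (c == '?') = false := by simp [h]
      simp only [List.foldl_cons, hb, Bool.false_eq_true, if_false, ih, pvA, if_neg h]
      simp

theorem pv_foldB (ps : List String) : ∀ (i : Int) (acc : String),
    ((ps.foldl
      (fun (st : Int × String) part =>
        (st.1 + 1, st.2 ++ ("$" ++ PySem.Int.toStr st.1) ++ part))
      (i, acc)).2).toList
      = acc.toList ++ pvStitch i (ps.map String.toList) := by
  induction ps with
  | nil => intro i acc; simp [pvStitch]
  | cons p t ih =>
    intro i acc
    simp only [List.foldl_cons, ih, List.map_cons, pvStitch]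
    simp [String.toList_append]

theorem pv_go_eq (fuel : Nat) : ∀ (l cur : List Char) (acc : List (List Char)),
    l.length ≤ fuel →
    PySem.Chars.splitOn.go ['?'] fuel l cur acc
      = acc.reverse ++ (l.splitOn '?').modifyHead (cur.reverse ++ ·) := by
  induction fuel with
  | zero =>
    intro l cur acc h
    have : l = [] := List.eq_nil_of_length_eq_zero (Nat.le_zero.mp h)
    subst this
    rw [PySem.Chars.splitOn.go.eq_1]
    simp [List.splitOn, List.splitOnP_nil, List.modifyHead]
  | succ fuel ih =>
    intro l cur acc h
    cases l with
    | nil =>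
      rw [PySem.Chars.splitOn.go.eq_2 _ _ _ _ (by simp)]
      simp [List.splitOn, List.splitOnP_nil, List.modifyHead]
    | cons c rest =>
      obtain ⟨q, qs, hq⟩ := List.exists_cons_of_ne_nil
        (List.splitOnP_ne_nil (fun x => x == '?') rest)
      rw [PySem.Chars.splitOn.go.eq_3]
      have hpre : (['?'].isPrefixOf (c :: rest)) = ('?' == c) := by
        simp [List.isPrefixOf]
      by_cases hc : c = '?'
      · subst hc
        rw [hpre]
        simp only [beq_self_eq_true]
        rw [ih _ _ _ (by simpa using Nat.le_of_succ_le_succ h)]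
        simp [List.splitOn, List.splitOnP_cons, hq, List.modifyHead]
      · have h1 : ('?' == c) = false := by simp [Ne.symm hc]
        have h2 : (c == '?') = false := by simp [hc]
        rw [hpre, h1]
        simp only [Bool.false_eq_true, if_false]
        rw [ih _ _ _ (by simpa using Nat.le_of_succ_le_succ h)]
        simp [List.splitOn, List.splitOnP_cons, h2, hq, List.modifyHead]

theorem pv_splitOn_eq (cs : List Char) :
    PySem.Chars.splitOn cs ['?'] = cs.splitOn '?' := by
  unfold PySem.Chars.splitOn
  rw [pv_go_eq _ _ _ _ (Nat.le_succ _)]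
  obtain ⟨q, qs, hq⟩ := List.exists_cons_of_ne_nil
    (List.splitOnP_ne_nil (fun x => x == '?') cs)
  simp [List.splitOn, hq, List.modifyHead]

theorem pv_core (cs : List Char) : ∀ (idx : Int) (p : List Char) (ps : List (List Char)),
    cs.splitOn '?' = p :: ps → pvA idx cs = p ++ pvStitch idx ps := by
  induction cs with
  | nil =>
    intro idx p ps h
    simp [List.splitOn, List.splitOnP_nil] at h
    obtain ⟨h1, h2⟩ := h
    subst h1; subst h2
    simp [pvA, pvStitch]
  | cons c t ih =>
    intro idx p ps h
    obtain ⟨q, qs, hq⟩ := List.exists_cons_of_ne_nil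
      (List.splitOnP_ne_nil (fun x => x == '?') t)
    have hqt : t.splitOn '?' = q :: qs := by simp [List.splitOn, hq]
    by_cases hc : c = '?'
    · subst hc
      have h' : ([] : List Char) :: q :: qs = p :: ps := by
        simpa [List.splitOn, List.splitOnP_cons, hq] using h
      obtain ⟨h1, h2⟩ := List.cons_eq_cons.mp h'
      subst h1
      rw [← h2]
      simp only [pvA, pvStitch]
      rw [ih (idx + 1) q qs hqt]
      simp
    · have h2 : (c == '?') = false := by simp [hc]
      simp only [List.splitOn, List.splitOnP_cons, h2, Bool.false_eq_true, if_false, hq,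
        List.modifyHead] at h
      obtain ⟨h1, h3⟩ := List.cons_eq_cons.mp h
      subst h3
      rw [← h1]
      simp only [pvA, if_neg hc, ih idx q qs hqt]
      simp

-- ===== VERDICT (by name: the statement is the Claim_ definition above) =====
theorem qmark_to_dollar_py_spec : Claim_equal_qmark_to_dollar_py := by
  intro query _
  unfold Spec_qmark_to_dollar_py qmark_to_dollar_py qmark_to_dollar_py_alt
  obtain ⟨q, qs, hq⟩ := List.exists_cons_of_ne_nil
    (List.splitOnP_ne_nil (fun x => x == '?') query.toList)
  have hsplit : query.toList.splitOn '?' = q :: qs := by simp [List.splitOn, hq]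
  have hs : PySem.Str.split? query "?"
      = some (String.ofList q :: qs.map String.ofList) := by
    simp [PySem.Str.split?, PySem.Chars.split?, pv_splitOn_eq, hsplit]
  rw [hs]
  apply String.toList_inj.mp
  rw [pv_join_nil, pv_foldA, pv_foldB]
  simp only [List.map_nil, List.flatten_nil, List.nil_append]
  rw [pv_core query.toList 1 q qs hsplit]
  simp [List.map_map, Function.comp_def]
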